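-- pv_equiv track=rewrite | github.com/Gaiedarwa/backend | routes.py | extract_name_improved
-- ===== SOURCE A (Python) =====
-- def extract_name_improved(cv_text):
--     """
--     Extrait le nom du candidat en évitant de confondre avec des titres de section.
--
--     Args:
--         cv_text (str): Le texte du CV
--
--     Returns:
--         str: Le nom détecté ou None
--     """
--     # Liste de titres de section courants à éviter
--     section_titles = [
--         "education", "formation", "expérience", "experience", "compétences",
--         "skills", "profil", "profile", "résumé", "summary", "contact", "coordonnées",
--         "projets", "projects", "languages", "langues", "certifications", "références"
--     ]
--
--     # Essayer de trouver le nom au début du CV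
--     lines = cv_text.split('\n')
--     potential_names = []
--
--     # Analyser les 10 premières lignes non vides
--     non_empty_count = 0
--     for line in lines:
--         line = line.strip()
--         if not line:
--             continue
--
--         non_empty_count += 1
--         if non_empty_count > 10:
--             break
--
--         # Ignorer les lignes trop courtes ou trop longues
--         if len(line) < 3 or len(line) > 40:
--             continue
--
--         # Ignorer les lignes qui sont des titres de section
--         if line.lower() in section_titles or any(title in line.lower() for title in section_titles):
--             continue
--
--         # Ignorer les lignes qui contiennent des caractères spéciaux courants dans les emails/téléphones/adresses
--         if any(char in line for char in ['@', ':', '/', '\\', 'http']):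
--             continue
--
--         # Ignorer les lignes qui commencent par des caractères non alphabétiques
--         if line and not line[0].isalpha():
--             continue
--
--         # Les noms ont tendance à avoir des majuscules
--         words = line.split()
--         if any(word and word[0].isupper() for word in words):
--             potential_names.append(line)
--
--     # Prioriser les noms qui ont l'air d'être des noms propres (commençant par majuscule)
--     for name in potential_names:
--         words = name.split()
--         # Vérifier si le nom ressemble à un nom propre (2-3 mots commençant par une majuscule)
--         if 1 <= len(words) <= 3 and all(word and word[0].isupper() for word in words):
--             return name
--
--     # Si aucun nom propre évident n'est trouvé, prendre le premier potentiel
--     if potential_names: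
--         return potential_names[0]
--
--     return None
-- ===== SOURCE B (Python) =====
-- def extract_name_improved(cv_text):
--     """Single-pass variant: return the first proper-name-looking line immediately,
--     keeping the first merely-acceptable line as a fallback."""
--     section_titles = [
--         "education", "formation", "expérience", "experience", "compétences",
--         "skills", "profil", "profile", "résumé", "summary", "contact", "coordonnées",
--         "projets", "projects", "languages", "langues", "certifications", "références"
--     ]
--
--     def passes(line):
--         if len(line) < 3 or len(line) > 40:
--             return False
--         low = line.lower()
--         if any(title in low for title in section_titles):
--             return False
--         if any(ch in line for ch in ['@', ':', '/', '\\', 'http']):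
--             return False
--         if not line[0].isalpha():
--             return False
--         return any(word[0].isupper() for word in line.split())
--
--     def proper(line):
--         words = line.split()
--         return 1 <= len(words) <= 3 and all(word[0].isupper() for word in words)
--
--     fallback = None
--     count = 0
--     for raw in cv_text.split('\n'):
--         line = raw.strip()
--         if not line:
--             continue
--         count += 1
--         if count > 10:
--             break
--         if passes(line):
--             if proper(line):
--                 return line
--             if fallback is None:
--                 fallback = line
--     return fallback
-- ===== Notes on version B (the rewrite author's own statement) =====
-- stated objective: simpler
-- what changed: Replaces collect-all-candidates-then-two-post-hoc-scans with a single early-exit pass that returns the first proper-name line immediately and remembers the first merely-acceptable line as fallback.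
import Mathlib
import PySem

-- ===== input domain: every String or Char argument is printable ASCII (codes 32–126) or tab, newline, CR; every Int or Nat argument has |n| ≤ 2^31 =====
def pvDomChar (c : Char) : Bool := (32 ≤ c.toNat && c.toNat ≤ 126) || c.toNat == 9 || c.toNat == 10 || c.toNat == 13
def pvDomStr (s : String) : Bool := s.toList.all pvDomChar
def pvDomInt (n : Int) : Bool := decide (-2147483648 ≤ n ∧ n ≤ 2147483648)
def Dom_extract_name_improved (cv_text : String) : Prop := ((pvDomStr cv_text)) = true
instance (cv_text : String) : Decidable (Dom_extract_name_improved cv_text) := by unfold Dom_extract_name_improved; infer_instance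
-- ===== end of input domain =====

-- B replaces A's collect-then-two-scans by one early-exit pass with a fallback accumulator (objective: simpler).

-- shared constant: the section-title list both Pythons define locally
def pvSectionTitles : List (List Char) :=
  ["education".toList, "formation".toList, "expérience".toList, "experience".toList,
   "compétences".toList, "skills".toList, "profil".toList, "profile".toList,
   "résumé".toList, "summary".toList, "contact".toList, "coordonnées".toList,
   "projets".toList, "projects".toList, "languages".toList, "langues".toList,
   "certifications".toList, "références".toList]

def pvSpecials : List (List Char) :=
  ["@".toList, ":".toList, "/".toList, "\\".toList, "http".toList]

-- ===== PORT A =====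
-- the main for-loop of A: walks the lines, counts non-empty ones, collects potential names
def aCollect : List (List Char) → Nat → List (List Char) → List (List Char)
  | [], _, acc => acc
  | raw :: rest, cnt, acc =>
    let line := PySem.Chars.strip raw
    if line = [] then aCollect rest cnt acc
    else if cnt + 1 > 10 then acc                                -- break
    else if line.length < 3 ∨ line.length > 40 then aCollect rest (cnt + 1) acc
    else if (PySem.Chars.lower line ∈ pvSectionTitles) ∨
            (pvSectionTitles.any (fun t => PySem.Chars.isIn t (PySem.Chars.lower line)) = true) then
      aCollect rest (cnt + 1) acc
    else if pvSpecials.any (fun c => PySem.Chars.isIn c line) then aCollect rest (cnt + 1) acc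
    -- 'line and not line[0].isalpha()': nonempty with a non-alphabetic first char
    else if (match line with | [] => false | c :: _ => !PySem.Chars.isalpha c) then
      aCollect rest (cnt + 1) acc
    else if (PySem.Chars.split₀ line).any
              (fun w => match w with | [] => false | d :: _ => PySem.Chars.isupper d) then
      aCollect rest (cnt + 1) (acc ++ [line])
    else aCollect rest (cnt + 1) acc

-- A's second loop: first collected line that looks like a proper name (1-3 words, all capitalised)
def aScan : List (List Char) → Option (List Char)
  | [] => none
  | name :: rest =>
    let words := PySem.Chars.split₀ name
    if decide (1 ≤ words.length) && decide (words.length ≤ 3) &&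
       words.all (fun w => match w with | [] => false | d :: _ => PySem.Chars.isupper d) then
      some name
    else aScan rest

def extract_name_improved (cv_text : String) : Option String :=
  let lines := PySem.Chars.splitOn cv_text.toList "\n".toList
  let potential_names := aCollect lines 0 []
  match aScan potential_names with
  | some name => some (String.ofList name)
  | none =>
    match potential_names with
    | [] => none
    | first :: _ => some (String.ofList first)

-- ===== PORT B =====
-- Source B's 'passes' helper: the guard cascade as an early-return chain
def bPasses (line : List Char) : Bool :=
  if line.length < 3 ∨ line.length > 40 then false
  else if pvSectionTitles.any (fun t => PySem.Chars.isIn t (PySem.Chars.lower line)) then false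
  else if pvSpecials.any (fun c => PySem.Chars.isIn c line) then false
  else
    match line with
    | [] => false   -- Source B only calls passes on non-empty stripped lines, where line[0] exists
    | c :: _ =>
      if !PySem.Chars.isalpha c then false
      else (PySem.Chars.split₀ line).any
             (fun w => match w with | [] => false | d :: _ => PySem.Chars.isupper d)

-- Source B's 'proper' helper
def bProper (line : List Char) : Bool :=
  let words := PySem.Chars.split₀ line
  decide (1 ≤ words.length) && decide (words.length ≤ 3) &&
    words.all (fun w => match w with | [] => false | d :: _ => PySem.Chars.isupper d)

-- Source B's single loop: early return on a proper name, first acceptable line kept as fallback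
def bLoop : List (List Char) → Nat → Option (List Char) → Option (List Char)
  | [], _, fb => fb
  | raw :: rest, cnt, fb =>
    let line := PySem.Chars.strip raw
    if line = [] then bLoop rest cnt fb
    else if cnt + 1 > 10 then fb                                 -- break
    else if bPasses line then
      if bProper line then some line
      else bLoop rest (cnt + 1) (match fb with | none => some line | some _ => fb)
    else bLoop rest (cnt + 1) fb

def extract_name_improved_alt (cv_text : String) : Option String :=
  (bLoop (PySem.Chars.splitOn cv_text.toList "\n".toList) 0 none).map String.ofList

-- ===== PRECONDITION & SPEC =====
def Spec_extract_name_improved (cv_text : String) (out : Option String) : Prop := out = extract_name_improved_alt cv_text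
instance (cv_text : String) (out : Option String) : Decidable (Spec_extract_name_improved cv_text out) := by unfold Spec_extract_name_improved; infer_instance

-- ===== CLAIM (what is proved, stated in full; the proofs are below) =====
def Claim_equal_extract_name_improved : Prop := ∀ (cv_text : String), Dom_extract_name_improved cv_text → Spec_extract_name_improved cv_text (extract_name_improved cv_text)

-- ===== LEMMAS AND PROOFS =====

-- A's loop only ever appends to its accumulator
theorem aCollect_acc (lines : List (List Char)) (cnt : Nat) (a1 a2 : List (List Char)) :
    aCollect lines cnt (a1 ++ a2) = a1 ++ aCollect lines cnt a2 := by
  induction lines generalizing cnt a2 with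
  | nil => simp [aCollect]
  | cons raw rest ih =>
    simp only [aCollect]
    split_ifs <;> simp [ih, List.append_assoc]

-- A's redundant first disjunct: exact membership implies the substring test
theorem mem_titles_any (low : List Char) (h : low ∈ pvSectionTitles) :
    pvSectionTitles.any (fun t => PySem.Chars.isIn t low) = true := by
  refine List.any_eq_true.mpr ⟨low, h, ?_⟩
  exact (PySem.Chars.isIn_iff_infix low low).mpr (List.infix_refl low)

-- A's second loop ignores a prefix of non-proper lines
theorem aScan_append (a l : List (List Char)) (h : ∀ x ∈ a, bProper x = false) :
    aScan (a ++ l) = aScan l := by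
  induction a with
  | nil => rfl
  | cons x t ih =>
    have hx := h x (by simp)
    simp only [List.cons_append, aScan]
    rw [if_neg, ih (fun y hy => h y (by simp [hy]))]
    simpa [bProper] using hx

-- the meaning of A's three phases, in terms of B's helpers
theorem main_loop (lines : List (List Char)) (cnt : Nat) (acc : List (List Char))
    (fb : Option (List Char)) (hacc : ∀ x ∈ acc, bProper x = false) (hfb : fb = acc.head?) :
    (match aScan (aCollect lines cnt acc) with
     | some name => some name
     | none =>
       match aCollect lines cnt acc with
       | [] => none
       | first :: _ => some first) = bLoop lines cnt fb := by
  induction lines generalizing cnt acc fb with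
  | nil =>
    simp only [aCollect, bLoop]
    rw [show aScan acc = aScan (acc ++ []) by simp, aScan_append acc [] hacc]
    cases acc <;> simp_all [aScan]
  | cons raw rest ih =>
    simp only [aCollect, bLoop]
    generalize PySem.Chars.strip raw = line
    by_cases h0 : line = []
    · simp only [if_pos h0]; exact ih cnt acc fb hacc hfb
    simp only [if_neg h0]
    by_cases h1 : cnt + 1 > 10
    · simp only [if_pos h1]
      rw [show aScan acc = aScan (acc ++ []) by simp, aScan_append acc [] hacc]
      cases acc <;> simp_all [aScan]
    simp only [if_neg h1]
    by_cases h2 : line.length < 3 ∨ line.length > 40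
    · have hp : bPasses line = false := by simp only [bPasses]; rw [if_pos h2]
      simp only [if_pos h2, hp, Bool.false_eq_true, if_false]
      exact ih (cnt + 1) acc fb hacc hfb
    simp only [if_neg h2]
    by_cases h3 : pvSectionTitles.any (fun t => PySem.Chars.isIn t (PySem.Chars.lower line)) = true
    · have hp : bPasses line = false := by simp only [bPasses]; rw [if_neg h2, if_pos h3]
      simp only [if_pos (Or.inr h3), hp, Bool.false_eq_true, if_false]
      exact ih (cnt + 1) acc fb hacc hfb
    · have h3' : ¬ ((PySem.Chars.lower line ∈ pvSectionTitles) ∨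
          (pvSectionTitles.any (fun t => PySem.Chars.isIn t (PySem.Chars.lower line)) = true)) := by
        rintro (hm | hany)
        · exact h3 (mem_titles_any _ hm)
        · exact h3 hany
      simp only [if_neg h3']
      by_cases h4 : pvSpecials.any (fun c => PySem.Chars.isIn c line) = true
      · have hp : bPasses line = false := by simp only [bPasses]; rw [if_neg h2, if_neg h3, if_pos h4]
        simp only [if_pos h4, hp, Bool.false_eq_true, if_false]
        exact ih (cnt + 1) acc fb hacc hfb
      simp only [if_neg h4]
      obtain ⟨c, t, rfl⟩ : ∃ c t, line = c :: t := by
        cases hl : line with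
        | nil => exact absurd hl h0
        | cons c t => exact ⟨c, t, rfl⟩
      by_cases h5 : PySem.Chars.isalpha c = true
      · simp only [h5, Bool.not_true, Bool.false_eq_true, if_false]
        by_cases h6 : (PySem.Chars.split₀ (c :: t)).any
            (fun w => match w with | [] => false | d :: _ => PySem.Chars.isupper d) = true
        · have hp : bPasses (c :: t) = true := by
            simp only [bPasses]
            rw [if_neg h2, if_neg h3, if_neg h4]
            simpa [h5] using h6
          simp only [if_pos h6, hp, if_true]
          by_cases h7 : bProper (c :: t) = true
          · simp only [if_pos h7]
            have hc : (decide (1 ≤ (PySem.Chars.split₀ (c :: t)).length) &&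
                decide ((PySem.Chars.split₀ (c :: t)).length ≤ 3) &&
                (PySem.Chars.split₀ (c :: t)).all
                  (fun w => match w with | [] => false | d :: _ => PySem.Chars.isupper d)) = true := by
              simpa [bProper] using h7
            rw [aCollect_acc rest (cnt + 1) acc [c :: t], aScan_append acc _ hacc,
                show aCollect rest (cnt + 1) [c :: t] = (c :: t) :: aCollect rest (cnt + 1) [] from by
                  simpa using aCollect_acc rest (cnt + 1) [c :: t] [],
                show aScan ((c :: t) :: aCollect rest (cnt + 1) []) = some (c :: t) from by
                  simp only [aScan]; rw [if_pos hc]]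
          · simp only [if_neg h7]
            refine ih (cnt + 1) (acc ++ [c :: t]) _ ?_ ?_
            · intro x hx
              rcases List.mem_append.mp hx with hx | hx
              · exact hacc x hx
              · simp only [List.mem_singleton] at hx
                subst hx; simpa using h7
            · cases acc with
              | nil => simp_all
              | cons a0 at' => simp_all
        · have hp : bPasses (c :: t) = false := by
            simp only [bPasses]
            rw [if_neg h2, if_neg h3, if_neg h4]
            simpa [h5] using h6
          simp only [if_neg h6, hp, Bool.false_eq_true, if_false]
          exact ih (cnt + 1) acc fb hacc hfb
      · have h5' : PySem.Chars.isalpha c = false := by simpa using h5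
        have hp : bPasses (c :: t) = false := by
          simp only [bPasses]
          rw [if_neg h2, if_neg h3, if_neg h4]
          simp [h5']
        simp only [h5', Bool.not_false, if_true, hp, Bool.false_eq_true, if_false]
        exact ih (cnt + 1) acc fb hacc hfb

-- ===== VERDICT (by name: the statement is the Claim_ definition above) =====
theorem extract_name_improved_spec : Claim_equal_extract_name_improved := by
  intro cv_text _
  unfold Spec_extract_name_improved extract_name_improved extract_name_improved_alt
  dsimp only
  rw [← main_loop (PySem.Chars.splitOn cv_text.toList "\n".toList) 0 [] none (by simp) rfl]
  generalize aCollect (PySem.Chars.splitOn cv_text.toList "\n".toList) 0 [] = L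
  cases aScan L with
  | some name => rfl
  | none => cases L with | nil => rfl | cons f t => rfl
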